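-- pv_equiv track=rewrite | github.com/peteh/smrt-chatbot | app/pipeline.py | extract_command_full
-- ===== SOURCE A (Python) =====
-- from typing import List
--
-- def extract_command_full(data: str) -> List[str]:
--     """Extracts commands from a text"""
--     left_over = data.strip()
--     if not left_over.startswith("#"):
--         return None
--     length = 0
--     for i in range(1, len(left_over)):
--         if left_over[i].isalnum() or left_over[i] == "_":
--             length += 1
--         else:
--             break
--     if length == 0:
--         return None
--     command = left_over[1:1 + length]
--     left_over = left_over[1 + length:]
--
--     params = ""
--     if len(left_over) > 0 and left_over[0] == "(":
--         end_parentesis = left_over.find(")")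
--         if end_parentesis == -1:
--             return None
--         params = left_over[1:end_parentesis]
--         left_over = left_over[end_parentesis+1:]
--
--     left_over = left_over.strip()
--     return (command, params, left_over)
-- ===== SOURCE B (Python) =====
-- import re
--
-- _CMD = re.compile(r'#(\w+)(?:\(([^)]*)\))?')
--
--
-- def extract_command_full(data: str):
--     """Extracts commands from a text"""
--     text = data.strip()
--     m = _CMD.match(text)
--     if m is None:
--         return None
--     rest = text[m.end():]
--     if m.group(2) is None and rest.startswith('('):
--         # an opening parenthesis that is never closed: malformed command
--         return None
--     return (m.group(1), m.group(2) or "", rest.strip())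
-- ===== Notes on version B (the rewrite author's own statement) =====
-- stated objective: idiomatic
-- what changed: Replaces the manual character-counting loop, slice bookkeeping and closing-parenthesis search with a single precompiled regular expression that matches the command token and the optional parenthesised parameter group in one step.
import Mathlib
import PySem

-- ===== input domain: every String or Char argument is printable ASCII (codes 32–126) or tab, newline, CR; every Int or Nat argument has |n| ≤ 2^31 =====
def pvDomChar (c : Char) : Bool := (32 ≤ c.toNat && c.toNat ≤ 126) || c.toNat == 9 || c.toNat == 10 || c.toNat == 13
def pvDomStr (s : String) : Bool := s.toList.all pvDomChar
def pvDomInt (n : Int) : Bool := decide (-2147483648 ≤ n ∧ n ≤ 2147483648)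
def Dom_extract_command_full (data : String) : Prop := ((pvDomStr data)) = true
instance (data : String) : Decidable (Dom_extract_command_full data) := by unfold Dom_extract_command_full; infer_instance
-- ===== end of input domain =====

-- B replaces A's manual counting loop and slice/find bookkeeping by a one-shot
-- structural matcher (port of Source B's precompiled regex r'#(\w+)(?:\(([^)]*)\))?').

-- ===== PORT A =====
-- 'left_over[i].isalnum() or left_over[i] == "_"'
def pvWordA (c : Char) : Bool := PySem.Chars.strIsalnum [c] || c == '_'

-- 'for i in range(1, len(left_over)): if …: length += 1 else: break'
def pvLenLoop (s : List Char) (is : List Int) (length : Int) : Int :=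
  match is with
  | [] => length
  | i :: rest =>
    match PySem.List.pyGet? s i with
    | some c => if pvWordA c then pvLenLoop s rest (length + 1) else length
    | none => length   -- unreachable: every i of range(1, len(s)) is in range

def extract_command_full (data : String) : Option (String × String × String) :=
  let left_over := PySem.Chars.strip data.toList
  if !PySem.Chars.startswith left_over ['#'] then none
  else
    let length := pvLenLoop left_over (PySem.List.pyRange 1 left_over.length) 0
    if length == 0 then none
    else
      let command := PySem.List.slice left_over (some 1) (some (1 + length))
      let left_over := PySem.List.slice left_over (some (1 + length)) none
      let params : List Char := []
      if 0 < left_over.length && PySem.List.pyGet? left_over 0 == some '(' then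
        let end_parentesis := PySem.Chars.find left_over [')']
        if end_parentesis == -1 then none
        else
          let params := PySem.List.slice left_over (some 1) (some end_parentesis)
          let left_over := PySem.List.slice left_over (some (end_parentesis + 1)) none
          some (String.ofList command, String.ofList params, String.ofList (PySem.Chars.strip left_over))
      else
        some (String.ofList command, String.ofList params, String.ofList (PySem.Chars.strip left_over))

-- ===== PORT B =====
-- the regex character class \w (ASCII part)
def pvWordB (c : Char) : Bool :=
  ('A' ≤ c && c ≤ 'Z') || ('a' ≤ c && c ≤ 'z') || ('0' ≤ c && c ≤ '9') || c == '_'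

-- _CMD.match(text) for _CMD = re.compile(r'#(\w+)(?:\(([^)]*)\))?'):
-- result = (group(1), group(2) : Option, text[m.end():]); none = no match
def pvReMatch (text : List Char) : Option (List Char × Option (List Char) × List Char) :=
  match text with
  | '#' :: rest =>
    match rest.takeWhile pvWordB with
    | [] => none
    | cmd =>
      let rest2 := rest.drop cmd.length
      match rest2 with
      | '(' :: inner =>
        let ps := inner.takeWhile (fun c => c != ')')
        match inner.drop ps.length with
        | ')' :: after => some (cmd, some ps, after)
        | _ => some (cmd, none, rest2)
      | _ => some (cmd, none, rest2)
  | _ => none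

def extract_command_full_alt (data : String) : Option (String × String × String) :=
  let text := PySem.Chars.strip data.toList
  match pvReMatch text with
  | none => none
  | some (cmd, ps?, rest) =>
    match ps?, rest with
    | none, '(' :: _ => none
    | ps?, rest => some (String.ofList cmd, String.ofList (ps?.getD []), String.ofList (PySem.Chars.strip rest))

-- ===== PRECONDITION & SPEC =====
def Spec_extract_command_full (data : String) (out : Option (String × String × String)) : Prop := out = extract_command_full_alt data
instance (data : String) (out : Option (String × String × String)) : Decidable (Spec_extract_command_full data out) := by unfold Spec_extract_command_full; infer_instance

-- ===== CLAIM (what is proved, stated in full; the proofs are below) =====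
def Claim_equal_extract_command_full : Prop := ∀ (data : String), Dom_extract_command_full data → Spec_extract_command_full data (extract_command_full data)

-- ===== LEMMAS AND PROOFS =====

lemma pvWord_eq : pvWordA = pvWordB := by
  funext c
  simp only [pvWordA, pvWordB, PySem.Chars.strIsalnum, PySem.Chars.isalnum,
    PySem.Chars.isalpha, PySem.Chars.isdigit, PySem.Chars.isupper, PySem.Chars.islower,
    List.all_cons, List.all_nil, List.isEmpty_cons, Bool.not_false, Bool.true_and, Bool.and_true,
    Bool.or_assoc]

lemma pyRange_one_nil (a b : Int) (h : b ≤ a) : PySem.List.pyRange a b = [] := by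
  simp [PySem.List.pyRange]
  intro; omega

-- A's counting loop computes the length of the takeWhile-prefix of the tail
lemma pvLenLoop_eq (s : List Char) : ∀ (j : Nat) (acc : Int), j ≤ s.length →
    pvLenLoop s (PySem.List.pyRange (j : Int) (s.length : Int)) acc
      = acc + (((s.drop j).takeWhile pvWordA).length : Int) := by
  intro j acc hj
  induction hn : s.length - j generalizing j acc with
  | zero =>
    have hle : s.length ≤ j := by omega
    rw [pyRange_one_nil _ _ (by exact_mod_cast hle)]
    simp [pvLenLoop, List.drop_eq_nil_of_le hle]
  | succ n ih =>
    have hlt : j < s.length := by omega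
    rw [PySem.List.pyRange_one_cons (by exact_mod_cast hlt)]
    have hget : PySem.List.pyGet? s (j : Int) = s[j]? := PySem.List.pyGet?_natCast s j
    rw [show ((j:Int)+1) = ((j+1 : Nat) : Int) by push_cast; ring]
    obtain ⟨c, hc⟩ : ∃ c, s[j]? = some c := ⟨s[j], List.getElem?_eq_getElem hlt⟩
    have hdrop : s.drop j = c :: s.drop (j+1) := by
      rw [List.drop_eq_getElem_cons hlt]
      simp [List.getElem?_eq_getElem hlt] at hc
      simp [hc]
    simp only [pvLenLoop, hget, hc, hdrop, List.takeWhile]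
    by_cases hw : pvWordA c
    · simp only [hw]
      rw [ih (j+1) (acc+1) (by omega) (by omega)]
      simp
      ring
    · simp [hw]

-- s.find(c) for a single character: first index of c, or -1
lemma find_go_singleton (c : Char) : ∀ (s : List Char) (k : Nat),
    PySem.Chars.find.go [c] s k
      = if c ∈ s then (((k + (s.takeWhile (fun d => d != c)).length : Nat)) : Int) else -1 := by
  intro s
  induction s with
  | nil => intro k; simp [PySem.Chars.find.go]
  | cons h t ih =>
    intro k
    rw [PySem.Chars.find.go]
    by_cases hc : h = c
    · subst hc
      simp [List.isPrefixOf, List.takeWhile]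
    · have hpre : List.isPrefixOf [c] (h :: t) = false := by
        simp [List.isPrefixOf]; exact fun hh => absurd hh.symm hc
      have hne : (h != c) = true := by simp [hc]
      simp only [hpre, Bool.false_eq_true, if_false]
      rw [ih (k+1)]
      simp only [List.takeWhile, hne, List.mem_cons]
      have : ¬ c = h := Ne.symm hc
      simp only [this, false_or, List.length_cons]
      split
      · push_cast; ring
      · rfl

-- dropping the maximal c-free prefix lands exactly on the first c
lemma drop_takeWhile_ne (c : Char) : ∀ (r : List Char), c ∈ r →
    r.drop ((r.takeWhile (fun d => d != c)).length)
      = c :: r.drop ((r.takeWhile (fun d => d != c)).length + 1) := by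
  intro r
  induction r with
  | nil => simp
  | cons h t ih =>
    intro hm
    by_cases hc : h = c
    · subst hc; simp [List.takeWhile]
    · have hmt : c ∈ t := by cases hm with | head => exact absurd rfl hc | tail _ h => exact h
      have hne : (h != c) = true := by simp [hc]
      simp only [List.takeWhile, hne, List.length_cons, List.drop_succ_cons]
      exact ih hmt

-- ===== VERDICT (by name: the statement is the Claim_ definition above) =====
theorem extract_command_full_spec : Claim_equal_extract_command_full := by
  intro data _
  unfold Spec_extract_command_full extract_command_full extract_command_full_alt pvReMatch
  cases ht : PySem.Chars.strip data.toList with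
  | nil => simp [PySem.Chars.startswith, List.isPrefixOf]
  | cons hd rest =>
    by_cases hhd : hd = '#'
    case neg =>
      simp [PySem.Chars.startswith, List.isPrefixOf, hhd]
      exact fun h => absurd h.symm hhd
    case pos =>
      subst hhd
      have hsw : PySem.Chars.startswith ('#'::rest) ['#'] = true := by
        simp [PySem.Chars.startswith, List.isPrefixOf]
      have hL : pvLenLoop ('#'::rest) (PySem.List.pyRange 1 ((('#'::rest).length : Nat) : Int)) 0
          = ((rest.takeWhile pvWordB).length : Int) := by
        have h := pvLenLoop_eq ('#'::rest) 1 0 (by simp)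
        rw [pvWord_eq, show ('#'::rest).drop 1 = rest from rfl] at h
        simpa using h
      simp only [hsw, Bool.not_true, Bool.false_eq_true, if_false, hL]
      rcases htc : rest.takeWhile pvWordB with _ | ⟨a, tl⟩
      · simp
      · have hpre : a :: tl = rest.take (a :: tl).length := by
          rw [← htc]; exact List.prefix_iff_eq_take.mp (List.takeWhile_prefix _)
        have hcmd : PySem.List.slice ('#'::rest) (some 1) (some (1 + ((a::tl).length : Int))) = a :: tl := by
          rw [show (1 : Int) = ((1:Nat) : Int) by norm_num,
              show ((1:Nat) : Int) + ((a::tl).length : Int) = (((1:Nat) : Int) + (((a::tl).length : Nat) : Int)) by push_cast; ring,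
              PySem.List.slice_natCast_add]
          simpa using hpre.symm
        have hrest2 : PySem.List.slice ('#'::rest) (some (1 + ((a::tl).length : Int))) = rest.drop (a::tl).length := by
          rw [show (1 : Int) + ((a::tl).length : Int) = (((1 + (a::tl).length : Nat)) : Int) by push_cast; ring,
              PySem.List.slice_from_natCast]
          rw [Nat.add_comm, List.drop_succ_cons]
        have hne0 : ((((a::tl).length : Int)) == 0) = false := by
          simp only [beq_eq_false_iff_ne, ne_eq, List.length_cons]
          push_cast
          omega
        rw [hcmd, hrest2, hne0]
        rcases hr2 : rest.drop (a::tl).length with _ | ⟨p, inner⟩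
        · simp only [List.length_cons] at hr2
          simp [hr2]
        · simp only [List.length_cons] at hr2
          by_cases hp : p = '('
          case neg =>
            simp [hp, hr2]
          case pos =>
            subst hp
            have hfind : PySem.Chars.find ('('::inner) [')']
                = if ')' ∈ inner then (((1 + (inner.takeWhile (fun d => d != ')')).length : Nat)) : Int) else -1 := by
              unfold PySem.Chars.find
              rw [find_go_singleton]
              simp [List.takeWhile]
              split_ifs
              · omega
              · rfl
            by_cases hin : ')' ∈ inner
            case neg =>
              have htws : inner.takeWhile (fun d => d != ')') = inner := by
                rw [List.takeWhile_eq_self_iff]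
                intro x hx
                simp only [bne_iff_ne, ne_eq]
                exact fun h => hin (h ▸ hx)
              simp [hfind, hin, htws, List.drop_length, hr2]
            case pos =>
              have hfind' : PySem.Chars.find ('('::inner) [')']
                  = 1 + (((inner.takeWhile (fun d => d != ')')).length : Nat) : Int) := by
                rw [hfind, if_pos hin]
                push_cast
                ring
              have hnne : ¬ (1 + (((inner.takeWhile (fun d => d != ')')).length : Nat) : Int) = -1) := by
                omega
              have hps : PySem.List.slice ('('::inner) (some 1)
                    (some (1 + (((inner.takeWhile (fun d => d != ')')).length : Nat) : Int)))
                  = inner.takeWhile (fun d => d != ')') := by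
                rw [PySem.List.slice_toNat]
                have h1 : ((1:Int) + (((inner.takeWhile (fun d => d != ')')).length : Nat) : Int)).toNat
                    = 1 + (inner.takeWhile (fun d => d != ')')).length := by omega
                have h0 : ((1:Int)).toNat = 1 := rfl
                rw [h1, h0]
                simp only [List.drop_succ_cons, List.drop_zero, Nat.add_sub_cancel_left]
                exact (List.prefix_iff_eq_take.mp (List.takeWhile_prefix _)).symm
                · omega
                · omega
              have hrem : PySem.List.slice ('('::inner)
                    (some (1 + (((inner.takeWhile (fun d => d != ')')).length : Nat) : Int) + 1))
                  = inner.drop ((inner.takeWhile (fun d => d != ')')).length + 1) := by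
                rw [PySem.List.slice_from]
                have h2 : ((1:Int) + (((inner.takeWhile (fun d => d != ')')).length : Nat) : Int) + 1).toNat
                    = ((inner.takeWhile (fun d => d != ')')).length + 1) + 1 := by omega
                rw [h2, List.drop_succ_cons]
                · omega
              have hsplit := drop_takeWhile_ne ')' inner hin
              simp [hfind', hnne, hps, hrem, hsplit, hr2]
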